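-- pv_equiv track=rewrite | github.com/dwsilverstein/evb_analysis | forward_hop.py | eval_hop_function
-- ===== SOURCE A (Python) =====
-- def eval_hop_function(ts, rxncenter):
--     '''Evaluate the hop function from the MS-EVB3 paper.  This is defined:
--
--        h(ts) = h(ts-1) + dh(ts)
--        h(0) = 0
--
--                 (  0 , if no proton hop
--        dh(ts) = {  1 , if proton hops to new acceptor
--                 ( -1 , if proton hops to the last donor
--
--        Here, ts is the timestep, and ts-1 is the previous timestep.'''
--
--     # Initialize the hop function
--     hts = []
--     # Set h(0) = 0
--     hts.append(0)
--
--     # Number of timesteps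
--     numts = len(ts)
--
--     # Initialize the identity of the previous donor
--     pdonor = [0]
--     for i in range(1,numts):
--         # Previous center
--         pcenter = rxncenter[i-1]
--         # Current center
--         ccenter = rxncenter[i]
--         # Evaluate the function
--         if pcenter == ccenter:
--             # No hop occurred
--             val = 0
--         else:
--             # Hop occurred
--             if ccenter == pdonor[-1]:
--                 # Here we checked that the current center is the previous donor.
--                 # If it is, we hopped backwards.
--                 val = -1
--             else:
--                 # If the current center changed (ccenter != pcenter) and the
--                 # current center is not the previous donor (ccenter != pdonor[-1]),
--                 # we must have hopped forward.
--                 val = 1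
--                 # Only change the last element of pdonor if a previous forward hop occurred.
--                 pdonor.append(pcenter)
--         hts.append(hts[i-1] + val)
--
--     return hts
-- ===== SOURCE B (Python) =====
-- def eval_hop_function(ts, rxncenter):
--     n = len(ts)
--     # Run-length encode the first n reaction centers: h is constant inside a
--     # run, so only run boundaries matter and the "no hop" case disappears.
--     centers, lengths = [], []
--     for c in rxncenter[:n]:
--         if centers and centers[-1] == c:
--             lengths[-1] += 1
--         else:
--             centers.append(c)
--             lengths.append(1)
--     hts = [0]
--     if centers:
--         hts += [0] * (lengths[0] - 1)
--     # Walk the boundaries between consecutive runs: adjacent runs always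
--     # differ, so each boundary is a hop — backward if the new center is the
--     # last donor, forward (the donor becomes the previous run's center) else.
--     h, d = 0, 0
--     for pc, c, L in zip(centers, centers[1:], lengths[1:]):
--         if c == d:
--             h -= 1
--         else:
--             h += 1
--             d = pc
--         hts += [h] * L
--     return hts
-- ===== Notes on version B (the rewrite author's own statement) =====
-- stated objective: alternative
-- what changed: A's single per-timestep loop (a dh of 0/+1/-1 per step, a running sum and a growing pdonor history list) is replaced by run-length encoding the reaction centers and then walking only the run boundaries, emitting each run's constant h-value as a block; the 'no hop' case disappears entirely.
import Mathlib
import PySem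

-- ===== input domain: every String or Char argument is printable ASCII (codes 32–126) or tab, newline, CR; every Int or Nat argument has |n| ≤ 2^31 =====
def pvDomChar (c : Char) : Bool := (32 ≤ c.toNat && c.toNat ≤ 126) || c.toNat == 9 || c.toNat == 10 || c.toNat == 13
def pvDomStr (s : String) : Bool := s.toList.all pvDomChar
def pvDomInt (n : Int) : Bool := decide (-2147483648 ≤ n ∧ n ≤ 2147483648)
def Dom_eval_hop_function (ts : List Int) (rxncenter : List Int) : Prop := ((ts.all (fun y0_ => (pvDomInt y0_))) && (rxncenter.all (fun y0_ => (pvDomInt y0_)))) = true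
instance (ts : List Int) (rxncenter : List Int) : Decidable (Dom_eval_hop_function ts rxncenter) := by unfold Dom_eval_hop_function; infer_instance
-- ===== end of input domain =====

-- B replaces A's per-timestep loop (delta per step, running sum, pdonor history list) by a
-- run-length encoding of the centers followed by a walk over run boundaries that emits each
-- run's constant h-value as a block; same asymptotic cost, different algorithm (objective: alternative).

-- ===== PORT A =====
-- one loop iteration of A: state is (hts, pdonor); hts[i-1]/pdonor[-1] via pyGetD (always in range here)
def stepA (rxncenter : List Int) (st : List Int × List Int) (i : Int) : List Int × List Int :=
  let hts := st.1
  let pdonor := st.2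
  let pcenter := PySem.List.pyGetD rxncenter (i - 1) 0
  let ccenter := PySem.List.pyGetD rxncenter i 0
  let vp : Int × List Int :=
    if pcenter = ccenter then (0, pdonor)
    else if ccenter = PySem.List.pyGetD pdonor (-1) 0 then (-1, pdonor)
    else (1, pdonor ++ [pcenter])
  (hts ++ [PySem.List.pyGetD hts (i - 1) 0 + vp.1], vp.2)

def eval_hop_function (ts : List Int) (rxncenter : List Int) : List Int :=
  ((PySem.List.pyRange 1 (ts.length : Int) 1).foldl (stepA rxncenter) ([0], [0])).1

-- ===== PORT B =====
-- the run-length-encoding pass: state (centers, lengths), 'lengths[-1] += 1' or append a new run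
def rleStep (st : List Int × List Int) (c : Int) : List Int × List Int :=
  if st.1 ≠ [] ∧ PySem.List.pyGetD st.1 (-1) 0 = c then
    (st.1, st.2.dropLast ++ [PySem.List.pyGetD st.2 (-1) 0 + 1])
  else
    (st.1 ++ [c], st.2 ++ [1])

-- the boundary walk: state (hts, h, d); each zipped triple is (pc, c, L)
def stepB (st : List Int × Int × Int) (t : Int × Int × Int) : List Int × Int × Int :=
  if t.2.1 = st.2.2 then
    (st.1 ++ PySem.List.pyRepeat [st.2.1 - 1] t.2.2, st.2.1 - 1, st.2.2)
  else
    (st.1 ++ PySem.List.pyRepeat [st.2.1 + 1] t.2.2, st.2.1 + 1, t.1)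

def eval_hop_function_alt (ts : List Int) (rxncenter : List Int) : List Int :=
  let n : Int := (ts.length : Int)
  let cl := (PySem.List.slice rxncenter none (some n)).foldl rleStep ([], [])
  -- hts = [0]; if centers: hts += [0] * (lengths[0] - 1)
  let hts0 : List Int :=
    if cl.1 ≠ [] then [0] ++ PySem.List.pyRepeat [0] (PySem.List.pyGetD cl.2 0 0 - 1) else [0]
  -- for pc, c, L in zip(centers, centers[1:], lengths[1:])
  ((cl.1.zip ((cl.1.drop 1).zip (cl.2.drop 1))).foldl stepB (hts0, 0, 0)).1

-- ===== PRECONDITION & SPEC =====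
-- Pre_ excludes exactly the inputs where Python A raises IndexError: rxncenter shorter than ts (with at least 2 timesteps).
def Pre_eval_hop_function (ts : List Int) (rxncenter : List Int) : Prop :=
  ts.length ≤ rxncenter.length ∨ ts.length ≤ 1
instance (ts : List Int) (rxncenter : List Int) : Decidable (Pre_eval_hop_function ts rxncenter) := by unfold Pre_eval_hop_function; infer_instance
def pvWitness_eval_hop_function : List Int × List Int := ([1, 2, 3], [5, 5, 6])

def Spec_eval_hop_function (ts : List Int) (rxncenter : List Int) (out : List Int) : Prop := out = eval_hop_function_alt ts rxncenter
instance (ts : List Int) (rxncenter : List Int) (out : List Int) : Decidable (Spec_eval_hop_function ts rxncenter out) := by unfold Spec_eval_hop_function; infer_instance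

-- ===== CLAIM (what is proved, stated in full; the proofs are below) =====
def Claim_equal_eval_hop_function : Prop := ∀ (ts : List Int) (rxncenter : List Int), Dom_eval_hop_function ts rxncenter → Pre_eval_hop_function ts rxncenter → Spec_eval_hop_function ts rxncenter (eval_hop_function ts rxncenter)
-- ===== LEMMAS AND PROOFS =====

-- a common reference shape both ports are reduced to:
-- hopCore p d h cs = the h-values after each further timestep, given previous center p, donor d, current h
def hopCore : Int → Int → Int → List Int → List Int
  | _, _, _, [] => []
  | p, d, h, c :: rest =>
    if p = c then h :: hopCore c d h rest
    else if c = d then (h - 1) :: hopCore c d (h - 1) rest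
    else (h + 1) :: hopCore c p (h + 1) rest

-- the (previous-center, donor, h) state after consuming a list
def finalPD : Int → Int → Int → List Int → Int × Int × Int
  | p, d, h, [] => (p, d, h)
  | p, d, h, c :: rest =>
    if p = c then finalPD c d h rest
    else if c = d then finalPD c d (h - 1) rest
    else finalPD c p (h + 1) rest

-- concatenation of runs back into the original list
def decodeRuns : List Int → List Int → List Int
  | c :: cs, L :: ls => List.replicate L.toNat c ++ decodeRuns cs ls
  | _, _ => []

lemma hopCore_append (l₁ l₂ : List Int) (p d h : Int) :
    hopCore p d h (l₁ ++ l₂) = hopCore p d h l₁ ++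
      hopCore (finalPD p d h l₁).1 (finalPD p d h l₁).2.1 (finalPD p d h l₁).2.2 l₂ := by
  induction l₁ generalizing p d h with
  | nil => simp [hopCore, finalPD]
  | cons c rest ih =>
    simp only [List.cons_append, hopCore, finalPD]
    split_ifs <;> simp [ih]

lemma finalPD_append (l₁ l₂ : List Int) (p d h : Int) :
    finalPD p d h (l₁ ++ l₂) =
      finalPD (finalPD p d h l₁).1 (finalPD p d h l₁).2.1 (finalPD p d h l₁).2.2 l₂ := by
  induction l₁ generalizing p d h with
  | nil => simp [finalPD]
  | cons c rest ih =>
    simp only [List.cons_append, finalPD]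
    split_ifs <;> simp [ih]

lemma hopCore_replicate (m : Nat) (p d h : Int) (rest : List Int) :
    hopCore p d h (List.replicate m p ++ rest) = List.replicate m h ++ hopCore p d h rest := by
  induction m with
  | zero => simp
  | succ k ih => simp [List.replicate_succ, hopCore, ih]

lemma idx_last (l : List Int) (k : Nat) (hl : l.length = k) (hk : 1 ≤ k) :
    PySem.List.pyGetD l ((k : Int) - 1) 0 = PySem.List.pyGetD l (-1) 0 := by
  have hne : l ≠ [] := by
    intro h; subst h; simp at hl; omega
  rw [PySem.List.pyGetD_neg_one _ _ hne]
  have hc : ((k : Int) - 1) = ((k - 1 : Nat) : Int) := by omega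
  rw [hc, PySem.List.pyGetD_natCast]
  rw [List.getLast_eq_getElem, List.getD_eq_getElem l 0 (by omega)]
  congr 1
  omega

-- ----- A side: the fold over pyRange computes 0 :: hopCore on the consumed prefix -----
lemma invA (rx : List Int) (n : Nat) (hn : 1 ≤ n) (hlen : n ≤ rx.length) :
    (((PySem.List.pyRange 1 (n : Int) 1).foldl (stepA rx) ([0], [0])).1
        = 0 :: hopCore (rx.getD 0 0) 0 0 ((rx.take n).drop 1))
    ∧ (((PySem.List.pyRange 1 (n : Int) 1).foldl (stepA rx) ([0], [0])).1.length = n)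
    ∧ (((PySem.List.pyRange 1 (n : Int) 1).foldl (stepA rx) ([0], [0])).2 ≠ [])
    ∧ (PySem.List.pyGetD (((PySem.List.pyRange 1 (n : Int) 1).foldl (stepA rx) ([0], [0]))).2 (-1) 0
        = (finalPD (rx.getD 0 0) 0 0 ((rx.take n).drop 1)).2.1)
    ∧ ((finalPD (rx.getD 0 0) 0 0 ((rx.take n).drop 1)).1 = rx.getD (n - 1) 0)
    ∧ (PySem.List.pyGetD (((PySem.List.pyRange 1 (n : Int) 1).foldl (stepA rx) ([0], [0]))).1 (-1) 0
        = (finalPD (rx.getD 0 0) 0 0 ((rx.take n).drop 1)).2.2) := by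
  induction n with
  | zero => omega
  | succ k ih =>
    by_cases hk : 1 ≤ k
    · have hklen : k ≤ rx.length := by omega
      obtain ⟨iha, ihb, ihc, ihd, ihe, ihf⟩ := ih hk hklen
      have hsplit : PySem.List.pyRange 1 ((k + 1 : Nat) : Int) 1
          = PySem.List.pyRange 1 (k : Int) 1 ++ [(k : Int)] := by
        push_cast
        exact PySem.List.pyRange_one_succ_right (by omega)
      have hgetk : rx[k]? = some (rx.getD k 0) := by
        rw [List.getD_eq_getElem rx 0 (by omega), List.getElem?_eq_getElem (by omega)]
      have hpref : (rx.take (k + 1)).drop 1 = (rx.take k).drop 1 ++ [rx.getD k 0] := by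
        rw [List.take_succ, hgetk]
        exact List.drop_append_of_le_length (by simp; omega)
      rw [hsplit, List.foldl_append, hpref]
      set S := (PySem.List.pyRange 1 (k : Int) 1).foldl (stepA rx) ([0], [0]) with hS
      simp only [List.foldl_cons, List.foldl_nil]
      have hcast : ((k : Int) - 1) = ((k - 1 : Nat) : Int) := by omega
      have hfins := finalPD_append ((rx.take k).drop 1) [rx.getD k 0] (rx.getD 0 0) 0 0
      have hhops := hopCore_append ((rx.take k).drop 1) [rx.getD k 0] (rx.getD 0 0) 0 0
      set q := finalPD (rx.getD 0 0) 0 0 ((rx.take k).drop 1) with hq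
      have hke : k + 1 - 1 = k := by omega
      unfold stepA
      simp only
      rw [idx_last S.1 k ihb hk, ihf, hcast]
      simp only [PySem.List.pyGetD_natCast]
      rw [ihd, hfins, hhops, ← ihe]
      simp only [finalPD, hopCore]
      split_ifs with h1 h2
      · exact ⟨by rw [iha]; simp, by simp [ihb], ihc, ihd,
          by simp [hke],
          by simp [PySem.List.pyGetD_neg_one_append_singleton]⟩
      · exact ⟨by rw [iha]; simp [sub_eq_add_neg], by simp [ihb], ihc, ihd,
          by simp [hke],
          by simp [PySem.List.pyGetD_neg_one_append_singleton, sub_eq_add_neg]⟩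
      · exact ⟨by rw [iha]; simp, by simp [ihb], by simp,
          by simp [PySem.List.pyGetD_neg_one_append_singleton],
          by simp [hke],
          by simp [PySem.List.pyGetD_neg_one_append_singleton]⟩
    · have hk0 : k = 0 := by omega
      subst hk0
      have hnil : PySem.List.pyRange 1 ((0 + 1 : Nat) : Int) 1 = [] :=
        PySem.List.pyRange_one_eq_nil (by norm_num)
      have hpref : (rx.take 1).drop 1 = ([] : List Int) := by
        cases rx <;> simp
      rw [hnil, hpref]
      refine ⟨by simp [hopCore], by simp, by simp, ?_, by simp [finalPD], ?_⟩
      · simp [finalPD, PySem.List.pyGetD_neg_one ([0] : List Int) 0 (by simp)]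
      · simp [finalPD, PySem.List.pyGetD_neg_one ([0] : List Int) 0 (by simp)]

-- ----- B side -----
-- invariant of the RLE fold
def GoodRLE (cs ls l : List Int) : Prop :=
  cs.length = ls.length ∧ (∀ x ∈ ls, 1 ≤ x) ∧ cs.IsChain (· ≠ ·) ∧ decodeRuns cs ls = l

lemma decode_snoc (cs ls : List Int) (c L : Int) (h : cs.length = ls.length) :
    decodeRuns (cs ++ [c]) (ls ++ [L]) = decodeRuns cs ls ++ List.replicate L.toNat c := by
  induction cs generalizing ls with
  | nil =>
    have : ls = [] := by simpa using h.symm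
    simp [this, decodeRuns]
  | cons a as ih =>
    cases ls with
    | nil => simp at h
    | cons b bs =>
      simp only [List.cons_append, decodeRuns, List.append_assoc]
      rw [ih bs (by simpa using h)]

lemma rle_inv (l : List Int) (cs ls acc : List Int) (h : GoodRLE cs ls acc) :
    GoodRLE (l.foldl rleStep (cs, ls)).1 (l.foldl rleStep (cs, ls)).2 (acc ++ l) := by
  induction l generalizing cs ls acc with
  | nil => simpa using h
  | cons x xs ih =>
    obtain ⟨hlen, hpos, hch, hdec⟩ := h
    simp only [List.foldl_cons]
    have hstep : GoodRLE (rleStep (cs, ls) x).1 (rleStep (cs, ls) x).2 (acc ++ [x]) := by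
      unfold rleStep
      by_cases hg : cs ≠ [] ∧ PySem.List.pyGetD cs (-1) 0 = x
      · obtain ⟨hne, hlast⟩ := hg
        have hlsne : ls ≠ [] := by
          intro hnil; subst hnil; simp at hlen; exact hne hlen
        have hl1 : 1 ≤ ls.length := List.length_pos_of_ne_nil hlsne
        rw [if_pos ⟨hne, hlast⟩]
        show GoodRLE cs (ls.dropLast ++ [PySem.List.pyGetD ls (-1) 0 + 1]) (acc ++ [x])
        rw [PySem.List.pyGetD_neg_one _ _ hlsne]
        have hcs : cs.dropLast ++ [cs.getLast hne] = cs := List.dropLast_append_getLast hne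
        have hls : ls.dropLast ++ [ls.getLast hlsne] = ls := List.dropLast_append_getLast hlsne
        have hlen' : cs.dropLast.length = ls.dropLast.length := by
          simp [List.length_dropLast, hlen]
        have hLpos : 1 ≤ ls.getLast hlsne := hpos _ (List.getLast_mem hlsne)
        refine ⟨by simp [List.length_dropLast]; omega, ?_, hch, ?_⟩
        · intro y hy
          rcases List.mem_append.mp hy with hy | hy
          · exact hpos y (List.dropLast_subset _ hy)
          · simp at hy
            omega
        · conv_lhs => rw [← hcs]
          rw [decode_snoc _ _ _ _ hlen']
          have htn : (ls.getLast hlsne + 1).toNat = (ls.getLast hlsne).toNat + 1 := by omega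
          rw [htn, List.replicate_succ' (n := (ls.getLast hlsne).toNat)]
          rw [← List.append_assoc]
          have hrw : decodeRuns cs.dropLast ls.dropLast ++ List.replicate (ls.getLast hlsne).toNat (cs.getLast hne)
              = decodeRuns cs ls := by
            conv_rhs => rw [← hcs, ← hls]
            rw [decode_snoc _ _ _ _ hlen']
          rw [hrw, hdec]
          rw [PySem.List.pyGetD_neg_one _ _ hne] at hlast
          rw [hlast]
      · rw [if_neg hg]
        show GoodRLE (cs ++ [x]) (ls ++ [1]) (acc ++ [x])
        refine ⟨by simp [hlen], ?_, ?_, ?_⟩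
        · intro y hy
          rcases List.mem_append.mp hy with hy | hy
          · exact hpos y hy
          · simp at hy; omega
        · rw [List.isChain_append]
          refine ⟨hch, by simp, ?_⟩
          intro a ha b hb
          simp at hb
          subst hb
          by_cases hne : cs = []
          · subst hne; simp at ha
          · rw [List.getLast?_eq_getLast hne] at ha
            simp at ha
            subst ha
            intro heq
            exact hg ⟨hne, by rw [PySem.List.pyGetD_neg_one _ _ hne, heq]⟩
        · rw [decode_snoc _ _ _ _ hlen, hdec]
          simp
    exact (by simpa [List.append_assoc] using ih _ _ _ hstep)

lemma foldB_eq (C' : List Int) (Ls' : List Int) (pc d h : Int) (hts0 : List Int)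
    (hlen : C'.length = Ls'.length) (hpos : ∀ x ∈ Ls', 1 ≤ x)
    (hch : (pc :: C').IsChain (· ≠ ·)) :
    (((pc :: C').zip (C'.zip Ls')).foldl stepB (hts0, h, d)).1
      = hts0 ++ hopCore pc d h (decodeRuns C' Ls') := by
  induction C' generalizing Ls' pc d h hts0 with
  | nil =>
    simp [decodeRuns, hopCore]
  | cons c C'' ih =>
    cases Ls' with
    | nil => simp at hlen
    | cons L Ls'' =>
      have hLpos : 1 ≤ L := hpos L (by simp)
      have hneq : pc ≠ c := (List.isChain_cons_cons.mp hch).1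
      have hrep : ∀ y : Int, List.replicate L.toNat y = y :: List.replicate (L.toNat - 1) y := by
        intro y
        rw [show L.toNat = (L.toNat - 1) + 1 from by omega, List.replicate_succ]
        simp
      simp only [List.zip_cons_cons, List.foldl_cons]
      by_cases h2 : c = d
      · rw [show stepB (hts0, h, d) (pc, (c, L)) = (hts0 ++ PySem.List.pyRepeat [h - 1] L, h - 1, d)
          from by unfold stepB; simp [h2]]
        rw [ih Ls'' c d (h - 1) _ (by simpa using hlen) (fun x hx => hpos x (by simp [hx]))
          (List.isChain_cons_cons.mp hch).2]
        simp only [decodeRuns, hrep c]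
        rw [List.cons_append, hopCore]
        rw [if_neg hneq, if_pos h2]
        rw [hopCore_replicate]
        simp [PySem.List.pyRepeat_singleton, List.append_assoc]
        rw [hrep (h - 1)]
        simp
      · rw [show stepB (hts0, h, d) (pc, (c, L)) = (hts0 ++ PySem.List.pyRepeat [h + 1] L, h + 1, pc)
          from by unfold stepB; simp [h2]]
        rw [ih Ls'' c pc (h + 1) _ (by simpa using hlen) (fun x hx => hpos x (by simp [hx]))
          (List.isChain_cons_cons.mp hch).2]
        simp only [decodeRuns, hrep c]
        rw [List.cons_append, hopCore]
        rw [if_neg hneq, if_neg h2]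
        rw [hopCore_replicate]
        simp [PySem.List.pyRepeat_singleton, List.append_assoc]
        rw [hrep (h + 1)]
        simp

lemma altB_eq (ts rx : List Int) (hn : 1 ≤ ts.length) (hlen : ts.length ≤ rx.length) :
    eval_hop_function_alt ts rx
      = 0 :: hopCore (rx.getD 0 0) 0 0 ((rx.take ts.length).drop 1) := by
  have hgood := rle_inv (rx.take ts.length) [] [] [] ⟨rfl, by simp, by simp, rfl⟩
  set P := (rx.take ts.length).foldl rleStep ([], []) with hP
  obtain ⟨hPlen, hPpos, hPch, hPdec⟩ := hgood
  simp only [List.nil_append] at hPdec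
  have hcslen : (rx.take ts.length).length = ts.length := by
    simp [List.length_take]; omega
  have hcsne : rx.take ts.length ≠ [] := by
    intro hnil; rw [hnil] at hcslen; simp at hcslen; omega
  have hCne : P.1 ≠ [] := by
    intro hnil
    rw [hnil] at hPdec
    exact hcsne (by rw [← hPdec]; rfl)
  obtain ⟨c0, C', hC⟩ := List.exists_cons_of_ne_nil hCne
  have hLne : P.2 ≠ [] := by
    intro hnil; rw [hC, hnil] at hPlen; simp at hPlen
  obtain ⟨L0, Ls', hL⟩ := List.exists_cons_of_ne_nil hLne
  have hL0 : 1 ≤ L0 := hPpos L0 (by rw [hL]; simp)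
  have hL0t : 1 ≤ L0.toNat := by omega
  have hdec : List.replicate L0.toNat c0 ++ decodeRuns C' Ls' = rx.take ts.length := by
    rw [← hPdec, hC, hL]; rfl
  -- reduce the definition of B to the boundary fold
  have hB : eval_hop_function_alt ts rx
      = (((c0 :: C').zip (C'.zip Ls')).foldl stepB
          (([0] ++ PySem.List.pyRepeat [0] (L0 - 1)), 0, 0)).1 := by
    unfold eval_hop_function_alt
    simp only
    rw [PySem.List.slice_to_natCast, ← hP, hC, hL]
    simp [PySem.List.pyGetD_zero_cons]
  rw [hB, foldB_eq C' Ls' c0 0 0 _ (by rw [hC, hL] at hPlen; simpa using hPlen)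
    (fun x hx => hPpos x (by rw [hL]; simp [hx])) (by rw [hC] at hPch; exact hPch)]
  -- identify the head and tail of the taken prefix
  have hdrop : (rx.take ts.length).drop 1
      = List.replicate (L0.toNat - 1) c0 ++ decodeRuns C' Ls' := by
    rw [← hdec, show L0.toNat = (L0.toNat - 1) + 1 from by omega, List.replicate_succ]
    simp
  have hhead : rx.getD 0 0 = c0 := by
    have h1 : (rx.take ts.length).getD 0 0 = rx.getD 0 0 := by
      cases rx with
      | nil =>
        have h0 : ts.length = 0 := by simpa using hlen
        omega
      | cons a as =>
        cases hts : ts.length with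
        | zero => omega
        | succ m => simp
    rw [← h1, ← hdec, show L0.toNat = (L0.toNat - 1) + 1 from by omega, List.replicate_succ]
    simp
  rw [hdrop, hhead, hopCore_replicate]
  rw [PySem.List.pyRepeat_singleton, show (L0 - 1).toNat = L0.toNat - 1 from by omega]
  simp

-- ===== VERDICT (by name: the statement is the Claim_ definition above) =====
theorem eval_hop_function_spec : Claim_equal_eval_hop_function := by
  intro ts rx _ hpre
  unfold Spec_eval_hop_function
  by_cases hmain : 1 ≤ ts.length ∧ ts.length ≤ rx.length
  · obtain ⟨h1, h2⟩ := hmain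
    have ha : eval_hop_function ts rx
        = 0 :: hopCore (rx.getD 0 0) 0 0 ((rx.take ts.length).drop 1) := (invA rx ts.length h1 h2).1
    rw [ha, altB_eq ts rx h1 h2]
  · -- degenerate cases: no timestep pair is processed; both sides are [0]
    have hsmall : ts.length ≤ 1 := by
      unfold Pre_eval_hop_function at hpre
      omega
    have htake : rx.take ts.length = [] := by
      by_cases h0 : ts.length = 0
      · simp [h0]
      · have : rx = [] := by
          have : rx.length = 0 := by omega
          exact List.eq_nil_of_length_eq_zero this
        simp [this]
    have hr : PySem.List.pyRange 1 ((ts.length : Int)) 1 = [] :=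
      PySem.List.pyRange_one_eq_nil (by omega)
    unfold eval_hop_function eval_hop_function_alt
    simp [hr, PySem.List.slice_to_natCast, htake]
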